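-- pv_equiv track=rewrite | github.com/lenatop666/Gaidarova_IS-22 | PZ_5/PZ_5(1).py | vt
-- ===== SOURCE A (Python) =====
-- def vt(word, height, symbol):
--     lines = []
--     for i in range(height):
--         if i == height // 2:
--             lines.append(f'{symbol} {word} {symbol}')
--         else:
--             lines.append(f'{symbol}{" " * (len(word) + 2)}{symbol}')
--     return "\n".join(lines)
-- ===== SOURCE B (Python) =====
-- def vt(word, height, symbol):
--     if height <= 0:
--         return ""
--     m = height // 2
--     border = symbol + " " * (len(word) + 2) + symbol
--     middle = symbol + " " + word + " " + symbol
--     return (border + "\n") * m + middle + ("\n" + border) * (height - 1 - m)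
-- ===== Notes on version B (the rewrite author's own statement) =====
-- stated objective: alternative
-- what changed: B builds no list of lines at all: it computes the three segments arithmetically (height//2 border lines above, the middle line, height-1-height//2 border lines below) and concatenates them with string repetition, instead of looping over range(height) with a per-line test and a join.
import Mathlib
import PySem

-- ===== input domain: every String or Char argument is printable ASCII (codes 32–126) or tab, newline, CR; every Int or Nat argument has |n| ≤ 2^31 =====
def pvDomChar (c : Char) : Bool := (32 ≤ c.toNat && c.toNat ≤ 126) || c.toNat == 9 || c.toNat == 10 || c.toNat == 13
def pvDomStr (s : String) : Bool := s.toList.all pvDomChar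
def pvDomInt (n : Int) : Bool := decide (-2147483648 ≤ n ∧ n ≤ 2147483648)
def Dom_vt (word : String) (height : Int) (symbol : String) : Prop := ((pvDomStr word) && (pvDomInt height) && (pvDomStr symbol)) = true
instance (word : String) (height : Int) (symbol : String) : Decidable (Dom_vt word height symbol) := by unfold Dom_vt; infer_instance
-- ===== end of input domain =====

-- B builds the framed box as three concatenated segments (repeated top borders, middle line, repeated bottom borders) with no list of lines; A loops over range(height) with a per-line test and joins.


-- ===== PORT A =====
def vt (word : String) (height : Int) (symbol : String) : String :=
  let lines := (PySem.List.pyRange 0 height 1).foldl (fun acc i =>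
    if i = PySem.Int.floordiv height 2 then
      acc ++ [symbol ++ " " ++ word ++ " " ++ symbol]
    else
      acc ++ [symbol ++ String.ofList (List.replicate ((PySem.Str.len word).toNat + 2) ' ') ++ symbol]) []
  PySem.Str.join "\n" lines

-- ===== PORT B =====
-- Python's  s * n  for strings (n ≤ 0 gives ""): exact
def pyStrMul (s : String) (n : Int) : String :=
  String.ofList (List.replicate n.toNat s.toList).flatten

def vt_alt (word : String) (height : Int) (symbol : String) : String :=
  if height ≤ 0 then "" else
  let m := PySem.Int.floordiv height 2
  let border := symbol ++ String.ofList (List.replicate ((PySem.Str.len word).toNat + 2) ' ') ++ symbol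
  let middle := symbol ++ " " ++ word ++ " " ++ symbol
  pyStrMul (border ++ "\n") m ++ middle ++ pyStrMul ("\n" ++ border) (height - 1 - m)

-- ===== PRECONDITION & SPEC =====
def Spec_vt (word : String) (height : Int) (symbol : String) (out : String) : Prop := out = vt_alt word height symbol
instance (word : String) (height : Int) (symbol : String) (out : String) : Decidable (Spec_vt word height symbol out) := by unfold Spec_vt; infer_instance

-- ===== CLAIM (what is proved, stated in full; the proofs are below) =====
def Claim_equal_vt : Prop := ∀ (word : String) (height : Int) (symbol : String), Dom_vt word height symbol → Spec_vt word height symbol (vt word height symbol)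

-- ===== LEMMAS AND PROOFS =====

-- A's loop builds the i-th line by the test i == height//2
theorem vt_fold_eq_map (h : Int) (mid border : String) :
    (PySem.List.pyRange 0 h 1).foldl (fun acc i =>
      if i = PySem.Int.floordiv h 2 then acc ++ [mid] else acc ++ [border]) [] =
    (PySem.List.pyRange 0 h 1).map
      (fun i => if i = PySem.Int.floordiv h 2 then mid else border) := by
  have : (fun (acc : List String) (i : Int) =>
      if i = PySem.Int.floordiv h 2 then acc ++ [mid] else acc ++ [border]) =
      fun acc i => acc ++ [if i = PySem.Int.floordiv h 2 then mid else border] := by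
    funext acc i; split <;> rfl
  rw [this, PySem.List.foldl_append_singleton_eq_map]
  simp

-- the line list is: m borders, the middle line, the remaining borders
theorem vt_map_eq_segments (h : Int) (hp : 0 < h) (mid border : String) :
    (PySem.List.pyRange 0 h 1).map
      (fun i => if i = PySem.Int.floordiv h 2 then mid else border) =
    List.replicate (h / 2).toNat border ++
      mid :: List.replicate (h.toNat - 1 - (h / 2).toNat) border := by
  have hq : PySem.Int.floordiv h 2 = h / 2 := PySem.Int.floordiv_eq_ediv_of_pos (by omega)
  have hm : (h / 2).toNat < h.toNat := by omega
  apply List.ext_getElem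
  · simp [PySem.List.length_pyRange_one]; omega
  · intro k hk1 hk2
    have hkn : k < h.toNat := by simpa [PySem.List.length_pyRange_one] using hk1
    simp only [List.getElem_map, PySem.List.getElem_pyRange_one, hq, zero_add]
    by_cases he : k = (h / 2).toNat
    · rw [if_pos (by omega)]
      rw [List.getElem_append_right (by simp [he])]
      simp [he]
    · rw [if_neg (by omega)]
      by_cases hlt : k < (h / 2).toNat
      · rw [List.getElem_append_left (by simpa using hlt)]
        simp
      · have h1 : (h / 2).toNat < k := by omega
        rw [List.getElem_append_right (by simp; omega)]
        simp only [List.length_replicate]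
        rcases Nat.exists_eq_add_of_lt h1 with ⟨d, hd⟩
        have : k - (h / 2).toNat = d + 1 := by omega
        simp [this]

-- joining that list is exactly B's three concatenated segments
theorem join_cons_ne (sep a : List Char) (l : List (List Char)) (hl : l ≠ []) :
    PySem.Chars.join sep (a :: l) = a ++ sep ++ PySem.Chars.join sep l := by
  cases l with
  | nil => exact absurd rfl hl
  | cons x xs => rw [PySem.Chars.join_cons_cons]

theorem join_tail (sep b mid : List Char) (k : Nat) :
    PySem.Chars.join sep (mid :: List.replicate k b) =
    mid ++ (List.replicate k (sep ++ b)).flatten := by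
  induction k generalizing mid with
  | zero => simp [PySem.Chars.join_singleton]
  | succ k ih =>
    rw [List.replicate_succ, PySem.Chars.join_cons_cons, ih b, List.replicate_succ,
      List.flatten_cons]
    simp

theorem join_segments (sep b mid : List Char) (m k : Nat) :
    PySem.Chars.join sep (List.replicate m b ++ mid :: List.replicate k b) =
    (List.replicate m (b ++ sep)).flatten ++ mid ++ (List.replicate k (sep ++ b)).flatten := by
  induction m with
  | zero => simp [join_tail]
  | succ m ih =>
    rw [List.replicate_succ, List.cons_append,
      join_cons_ne sep b _ (by simp), ih, List.replicate_succ, List.flatten_cons]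
    simp

-- ===== VERDICT (by name: the statement is the Claim_ definition above) =====
theorem vt_spec : Claim_equal_vt := by
  intro word height symbol _
  unfold Spec_vt vt vt_alt
  by_cases hp : height ≤ 0
  · have h0 : PySem.List.pyRange 0 height 1 = [] := PySem.List.pyRange_one_eq_nil (by omega)
    rw [if_pos hp, h0]
    apply String.ext
    simp [PySem.Str.join, PySem.Chars.join, List.intercalate]
  · rw [if_neg hp]
    rw [vt_fold_eq_map, vt_map_eq_segments height (by omega)]
    apply String.ext
    have hm : (height / 2).toNat < height.toNat := by omega
    have hq : PySem.Int.floordiv height 2 = height / 2 :=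
      PySem.Int.floordiv_eq_ediv_of_pos (by omega)
    simp only [pyStrMul, hq, PySem.Str.join]
    have hk : (height - 1 - height / 2).toNat = height.toNat - 1 - (height / 2).toNat := by
      omega
    simp [join_segments, hk, List.map_replicate]
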